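-- pv_equiv track=rewrite | github.com/donkrazy/algoorithm | 8.7-PI.py | solve
-- ===== SOURCE A (Python) =====
-- def difficulty(b):
--     # Assume that 3 <= len(b) <= 5
--     b = [int(i) for i in b]
--
--     # case 1
--     if len(set(b)) == 1:
--         return 1
--
--     # case 2
--     if all(b[i] - b[i - 1] == 1 for i in range(1, len(b))) or all(b[i] - b[i - 1] == -1 for i in range(1, len(b))):
--         return 2
--
--     # case 3
--     if len(set(b)) == 2 and len(set(b[1::2])) == 1 and len(set(b[::2])) == 1:
--         return 4
--
--     # case 4
--     d = b[1] - b[0]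
--     if all(b[i] - b[i - 1] == d for i in range(1, len(b))):
--         return 5
--
--     # case 5
--     return 10
--
-- def solve(a, cache, idx):
--     if cache[idx] != -1:
--         return cache[idx]
--
--     len_a = len(a[idx:])
--     if len_a < 3:
--         ret = 9999999
--     elif len_a >= 3 and len_a <= 5:
--         ret = difficulty(a[idx:])
--     else:
--         ret = min(difficulty(a[idx:idx + 3]) + solve(a, cache, idx + 3),
--                   difficulty(a[idx:idx + 4]) + solve(a, cache, idx + 4),
--                   difficulty(a[idx:idx + 5]) + solve(a, cache, idx + 5))
--
--     cache[idx] = ret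
--     return ret
-- ===== SOURCE B (Python) =====
-- def difficulty(b):
--     # Assume that 3 <= len(b) <= 5
--     b = [int(i) for i in b]
--
--     # case 1
--     if len(set(b)) == 1:
--         return 1
--
--     # case 2
--     if all(b[i] - b[i - 1] == 1 for i in range(1, len(b))) or all(b[i] - b[i - 1] == -1 for i in range(1, len(b))):
--         return 2
--
--     # case 3
--     if len(set(b)) == 2 and len(set(b[1::2])) == 1 and len(set(b[::2])) == 1:
--         return 4
--
--     # case 4
--     d = b[1] - b[0]
--     if all(b[i] - b[i - 1] == d for i in range(1, len(b))):
--         return 5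
--
--     # case 5
--     return 10
--
--
-- def solve(a, cache, idx):
--     # Bottom-up iterative DP instead of memoized recursion.
--     # NOTE: unlike the original, this does not write results back into `cache`
--     # (return value only).
--     if cache[idx] != -1:
--         return cache[idx]
--     tail = a[idx:]
--     n = len(tail)
--     if n < 3:
--         return 9999999
--     if n <= 5:
--         return difficulty(tail)
--     dp = [0] * (n + 1)
--     for p in range(n - 1, -1, -1):
--         c = cache[idx + p] if 0 <= idx + p < len(cache) else -1
--         if c != -1:
--             dp[p] = c
--         elif n - p < 3:
--             dp[p] = 9999999
--         elif n - p <= 5: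
--             dp[p] = difficulty(tail[p:])
--         else:
--             dp[p] = min(difficulty(tail[p:p + 3]) + dp[p + 3],
--                         difficulty(tail[p:p + 4]) + dp[p + 4],
--                         difficulty(tail[p:p + 5]) + dp[p + 5])
--     return dp[0]
-- ===== Notes on version B (the rewrite author's own statement) =====
-- stated objective: alternative
-- what changed: Replaced the cache-mutating memoized recursion with a bottom-up iterative DP that fills a local dp table from the end of the string towards idx (treating pre-filled cache entries as fixed values), reading dp[p+3..p+5] instead of recursing; B does not write results back into cache (return value only).
import Mathlib
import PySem

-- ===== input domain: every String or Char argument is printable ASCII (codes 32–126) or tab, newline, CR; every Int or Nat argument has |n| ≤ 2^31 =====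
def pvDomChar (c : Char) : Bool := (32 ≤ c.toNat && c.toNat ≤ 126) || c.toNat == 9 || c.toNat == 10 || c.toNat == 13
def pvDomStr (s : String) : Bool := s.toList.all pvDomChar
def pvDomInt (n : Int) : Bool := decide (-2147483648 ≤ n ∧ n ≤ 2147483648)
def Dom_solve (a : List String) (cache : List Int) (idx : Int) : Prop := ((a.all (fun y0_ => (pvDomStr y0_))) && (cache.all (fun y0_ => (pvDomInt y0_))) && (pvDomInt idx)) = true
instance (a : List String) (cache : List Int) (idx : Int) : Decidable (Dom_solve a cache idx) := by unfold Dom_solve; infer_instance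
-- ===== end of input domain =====

-- B replaces A's cache-mutating memoized recursion by a bottom-up backward DP over a local table
-- (objective: alternative); equivalence is about the RETURN value only — A writes results into
-- `cache`, B does not mutate it.

-- ===== PORT A =====
-- shared helper: int(s); exact on Pre_ (every consumed string parses)
def pyIntOf (s : String) : Int := (PySem.Int.ofStr? s).getD 0

-- all(b[i] - b[i-1] == d for i in range(1, len(b)))
def stepAll (b : List Int) (d : Int) : Bool :=
  (PySem.List.pyRange 1 (b.length : Int) 1).all
    (fun i => PySem.List.pyGetD b i 0 - PySem.List.pyGetD b (i - 1) 0 == d)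

-- difficulty(b) — identical in A and in B (B keeps the helper unchanged)
def difficulty (bs : List String) : Int :=
  let b := bs.map pyIntOf
  if (PySem.Set.ofList b).length = 1 then 1
  else if stepAll b 1 || stepAll b (-1) then 2
  else if (PySem.Set.ofList b).length = 2
        ∧ (PySem.Set.ofList ((PySem.List.slice? b (some 1) none 2).getD [])).length = 1
        ∧ (PySem.Set.ofList ((PySem.List.slice? b none none 2).getD [])).length = 1 then 4
  else if stepAll b (PySem.List.pyGetD b 1 0 - PySem.List.pyGetD b 0 0) then 5
  else 10

-- solve(a, cache, idx), threading the mutated cache; fuel only makes the recursion structural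
def solveAux (fuel : Nat) (a : List String) (cache : List Int) (idx : Int) : Int × List Int :=
  match fuel with
  | 0 => (0, cache)
  | fuel + 1 =>
    let c := PySem.List.pyGetD cache idx 0     -- cache[idx]; IndexError excluded by Pre_
    if c ≠ -1 then (c, cache)
    else
      let tail := PySem.List.slice a (some idx) none
      if tail.length < 3 then (9999999, PySem.List.pySetD cache idx 9999999)
      else if tail.length ≤ 5 then
        (difficulty tail, PySem.List.pySetD cache idx (difficulty tail))
      else
        let r3 := solveAux fuel a cache (idx + 3)
        let r4 := solveAux fuel a r3.2 (idx + 4)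
        let r5 := solveAux fuel a r4.2 (idx + 5)
        let ret := min (difficulty (PySem.List.slice a (some idx) (some (idx + 3))) + r3.1)
          (min (difficulty (PySem.List.slice a (some idx) (some (idx + 4))) + r4.1)
            (difficulty (PySem.List.slice a (some idx) (some (idx + 5))) + r5.1))
        (ret, PySem.List.pySetD r5.2 idx ret)

def solve (a : List String) (cache : List Int) (idx : Int) : Int :=
  (solveAux (a.length + 1) a cache idx).1

-- ===== PORT B =====
-- one iteration of B's backward loop: dp[p] = value of position p
def altStep (tail : List String) (cache : List Int) (idx : Int) (n : Nat) (dp : List Int) (p : Int) : List Int :=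
  let c := if 0 ≤ idx + p ∧ idx + p < (cache.length : Int) then PySem.List.pyGetD cache (idx + p) 0 else -1
  let v :=
    if c ≠ -1 then c
    else if (n : Int) - p < 3 then 9999999
    else if (n : Int) - p ≤ 5 then difficulty (PySem.List.slice tail (some p) none)
    else
      min (difficulty (PySem.List.slice tail (some p) (some (p + 3))) + PySem.List.pyGetD dp (p + 3) 0)
        (min (difficulty (PySem.List.slice tail (some p) (some (p + 4))) + PySem.List.pyGetD dp (p + 4) 0)
          (difficulty (PySem.List.slice tail (some p) (some (p + 5))) + PySem.List.pyGetD dp (p + 5) 0))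
  PySem.List.pySetD dp p v

def solve_alt (a : List String) (cache : List Int) (idx : Int) : Int :=
  let c := PySem.List.pyGetD cache idx 0
  if c ≠ -1 then c
  else
    let tail := PySem.List.slice a (some idx) none
    let n := tail.length
    if n < 3 then 9999999
    else if n ≤ 5 then difficulty tail
    else
      let dp := (PySem.List.pyRange ((n : Int) - 1) (-1) (-1)).foldl
        (altStep tail cache idx n) (List.replicate (n + 1) 0)
      PySem.List.pyGetD dp 0 0

-- ===== PRECONDITION & SPEC =====
-- Pre_ excludes inputs where A raises (cache index out of range; ValueError from int() on a
-- consumed string; an IndexError on cache during the recursion) and, conservatively, some inputs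
-- on which A still returns: negative start indices reaching the recursion, and inputs that avoid
-- parse/index errors only thanks to pre-filled cache entries.
def Pre_solve (a : List String) (cache : List Int) (idx : Int) : Prop :=
  PySem.Raise.InRange cache.length idx ∧
  ( PySem.List.pyGetD cache idx 0 ≠ -1 ∨
    (PySem.List.slice a (some idx) none).length < 3 ∨
    (0 ≤ idx ∧ (∀ s ∈ PySem.List.slice a (some idx) none, (PySem.Int.ofStr? s).isSome = true) ∧
      (5 < (PySem.List.slice a (some idx) none).length → a.length ≤ cache.length)) )
instance (a : List String) (cache : List Int) (idx : Int) : Decidable (Pre_solve a cache idx) := by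
  unfold Pre_solve; infer_instance

def pvWitness_solve : List String × List Int × Int := (["1", "2", "3"], [-1], 0)

def Spec_solve (a : List String) (cache : List Int) (idx : Int) (out : Int) : Prop := out = solve_alt a cache idx
instance (a : List String) (cache : List Int) (idx : Int) (out : Int) : Decidable (Spec_solve a cache idx out) := by unfold Spec_solve; infer_instance

-- ===== CLAIM (what is proved, stated in full; the proofs are below) =====
def Claim_equal_solve : Prop := ∀ (a : List String) (cache : List Int) (idx : Int), Dom_solve a cache idx → Pre_solve a cache idx → Spec_solve a cache idx (solve a cache idx)

-- ===== LEMMAS AND PROOFS =====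

-- the mathematical value of position p (offset from start i), relative to the ORIGINAL cache
def Dval (a : List String) (cache : List Int) (i : Nat) (p : Nat) : Int :=
  if _h : p < a.length - i then
    if cache.getD (i + p) 0 ≠ -1 then cache.getD (i + p) 0
    else if a.length - i - p < 3 then 9999999
    else if _h5 : a.length - i - p ≤ 5 then difficulty (a.drop (i + p))
    else
      min (difficulty ((a.drop (i + p)).take 3) + Dval a cache i (p + 3))
        (min (difficulty ((a.drop (i + p)).take 4) + Dval a cache i (p + 4))
          (difficulty ((a.drop (i + p)).take 5) + Dval a cache i (p + 5)))
  else 0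
termination_by a.length - i - p
decreasing_by all_goals omega

-- invariant on the threaded cache: every entry is the original one or the final value of its position
def CInv (a : List String) (cache : List Int) (i : Nat) (c' : List Int) : Prop :=
  c'.length = cache.length ∧
  ∀ j, j < a.length → (c'.getD j 0 = cache.getD j 0 ∨ c'.getD j 0 = Dval a cache i (j - i))

lemma solveAux_eq (a : List String) (cache : List Int) (i : Nat)
    (hlen : a.length ≤ cache.length) :
    ∀ (fuel : Nat) (p : Nat) (c' : List Int), CInv a cache i c' →
      p < a.length - i → a.length - i - p ≤ fuel →
      (solveAux fuel a c' ((i : Int) + (p : Int))).1 = Dval a cache i p ∧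
      CInv a cache i (solveAux fuel a c' ((i : Int) + (p : Int))).2 := by
  have hDhit : ∀ p : Nat, p < a.length - i → cache.getD (i + p) 0 ≠ -1 →
      Dval a cache i p = cache.getD (i + p) 0 := by
    intro p hp h
    rw [Dval, dif_pos hp, if_pos h]
  intro fuel
  induction fuel with
  | zero => intro p c' _ hp hf; exact absurd hp (by omega)
  | succ fuel ih =>
    intro p c' hinv hp hf
    obtain ⟨hlen', hcc⟩ := hinv
    have hip : i + p < a.length := by omega
    have hcast : (i:Int) + (p:Int) = ((i + p : Nat) : Int) := by push_cast; ring
    have hset : ∀ (c'' : List Int), CInv a cache i c'' → ∀ v, v = Dval a cache i p →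
        CInv a cache i (PySem.List.pySetD c'' ((i + p : Nat) : Int) v) := by
      intro c'' hinv'' v hv
      obtain ⟨hl'', hc''⟩ := hinv''
      constructor
      · simp [hl'']
      · intro j hjlen
        rw [PySem.List.pySetD_natCast]
        by_cases hji : j = i + p
        · right
          subst hji
          rw [List.getD_eq_getElem?_getD, List.getElem?_set_self (by omega), Option.getD_some]
          rw [show i + p - i = p by omega]
          exact hv
        · rcases hc'' j hjlen with h | h
          · left
            rw [List.getD_eq_getElem?_getD, List.getElem?_set_ne (by omega),
              ← List.getD_eq_getElem?_getD]
            exact h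
          · right
            rw [List.getD_eq_getElem?_getD, List.getElem?_set_ne (by omega),
              ← List.getD_eq_getElem?_getD]
            exact h
    rw [solveAux, hcast, PySem.List.pyGetD_natCast, PySem.List.slice_from_natCast]
    have hj := hcc (i + p) hip
    rw [show i + p - i = p by omega] at hj
    by_cases hcv : c'.getD (i + p) 0 = -1
    case neg =>
      rw [if_pos (by simpa using hcv)]
      refine ⟨?_, hlen', hcc⟩
      rcases hj with h | h
      · rw [h, hDhit p hp (h ▸ hcv)]
      · exact h
    case pos =>
      rw [if_neg (by simpa using hcv)]
      have horig : cache.getD (i + p) 0 = -1 := by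
        rcases hj with h | h
        · rw [← h]; exact hcv
        · by_contra hne
          have h2 := hDhit p hp hne
          rw [h, h2] at hcv
          exact hne hcv
      have hmiss3 : a.length - (i + p) < 3 → Dval a cache i p = 9999999 := by
        intro h3
        rw [Dval, dif_pos hp, if_neg (by simpa using horig), if_pos (by omega)]
      have hmiss5 : ¬ a.length - (i + p) < 3 → a.length - (i + p) ≤ 5 →
          Dval a cache i p = difficulty (a.drop (i + p)) := by
        intro h3 h5
        rw [Dval, dif_pos hp, if_neg (by simpa using horig), if_neg (by omega),
          dif_pos (by omega)]
      by_cases h3 : a.length - (i + p) < 3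
      · rw [if_pos (by simpa using h3)]
        exact ⟨(hmiss3 h3).symm, hset c' ⟨hlen', hcc⟩ _ (hmiss3 h3).symm⟩
      · rw [if_neg (by simpa using h3)]
        by_cases h5 : a.length - (i + p) ≤ 5
        · rw [if_pos (by simpa using h5)]
          exact ⟨(hmiss5 h3 h5).symm, hset c' ⟨hlen', hcc⟩ _ (hmiss5 h3 h5).symm⟩
        · rw [if_neg (by simpa using h5)]
          dsimp only
          have hc3 : ((i + p : Nat) : Int) + 3 = ((i + (p + 3) : Nat) : Int) := by push_cast; ring
          have hc4 : ((i + p : Nat) : Int) + 4 = ((i + (p + 4) : Nat) : Int) := by push_cast; ring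
          have hc5 : ((i + p : Nat) : Int) + 5 = ((i + (p + 5) : Nat) : Int) := by push_cast; ring
          have hsl : ∀ m : Nat, PySem.List.slice a (some ((i + p : Nat) : Int)) (some ((i + (p + m) : Nat) : Int))
              = (a.drop (i + p)).take m := by
            intro m
            rw [PySem.List.slice_natCast]
            congr 1
            omega
          have e3 := ih (p + 3) c' ⟨hlen', hcc⟩ (by omega) (by omega)
          rw [show (i : Int) + ((p + 3 : Nat) : Int) = ((i + (p + 3) : Nat) : Int) by push_cast; ring] at e3
          have e4 := ih (p + 4) (solveAux fuel a c' ((i + (p + 3) : Nat) : Int)).2 e3.2 (by omega) (by omega)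
          rw [show (i : Int) + ((p + 4 : Nat) : Int) = ((i + (p + 4) : Nat) : Int) by push_cast; ring] at e4
          have e5 := ih (p + 5) (solveAux fuel a (solveAux fuel a c' ((i + (p + 3) : Nat) : Int)).2 ((i + (p + 4) : Nat) : Int)).2 e4.2 (by omega) (by omega)
          rw [show (i : Int) + ((p + 5 : Nat) : Int) = ((i + (p + 5) : Nat) : Int) by push_cast; ring] at e5
          have hret : Dval a cache i p =
              min (difficulty ((a.drop (i + p)).take 3) + Dval a cache i (p + 3))
                (min (difficulty ((a.drop (i + p)).take 4) + Dval a cache i (p + 4))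
                  (difficulty ((a.drop (i + p)).take 5) + Dval a cache i (p + 5))) := by
            rw [Dval, dif_pos hp, if_neg (by simpa using horig), if_neg (by omega),
              dif_neg (by omega)]
          rw [hc3, hc4, hc5, hsl 3, hsl 4, hsl 5, e3.1, e4.1, e5.1]
          exact ⟨hret.symm, hset _ e5.2 _ hret.symm⟩

lemma fold_dp (a : List String) (cache : List Int) (i : Nat)
    (hlen : a.length ≤ cache.length) :

    ∀ (k : Nat) (dp : List Int), k ≤ a.length - i → dp.length = a.length - i + 1 →
      (∀ q, k ≤ q → q < a.length - i → dp.getD q 0 = Dval a cache i q) →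
      ((PySem.List.pyRange ((k : Int) - 1) (-1) (-1)).foldl
          (altStep (a.drop i) cache (i : Int) (a.length - i)) dp).length = a.length - i + 1 ∧
      ∀ q, q < a.length - i →
        ((PySem.List.pyRange ((k : Int) - 1) (-1) (-1)).foldl
          (altStep (a.drop i) cache (i : Int) (a.length - i)) dp).getD q 0 = Dval a cache i q := by
  intro k
  induction k with
  | zero =>
    intro dp _hk hdl hdp
    rw [show ((0:Nat):Int) - 1 = -1 by norm_num, PySem.List.pyRange_neg_one_eq_nil (by norm_num)]
    exact ⟨hdl, fun q hq => hdp q (Nat.zero_le q) hq⟩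
  | succ k ih =>
    intro dp hk hdl hdp
    have hkn : k < a.length - i := by omega
    have hrange : PySem.List.pyRange (((k+1:Nat) : Int) - 1) (-1) (-1)
        = (k : Int) :: PySem.List.pyRange ((k : Int) - 1) (-1) (-1) := by
      have : (((k+1:Nat) : Int) - 1) = (k : Int) := by push_cast; ring
      rw [this, PySem.List.pyRange_neg_one_cons (by omega)]
    have hstep : altStep (a.drop i) cache (i : Int) (a.length - i) dp (k : Int)
        = dp.set k (Dval a cache i k) := by
      have hik : i + k < a.length := by omega
      have hguard : (0 ≤ (i:Int) + (k:Int) ∧ (i:Int) + (k:Int) < (cache.length : Int)) := by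
        constructor <;> omega
      have hcast : (i:Int) + (k:Int) = ((i + k : Nat) : Int) := by push_cast; ring
      have hdropdrop : (a.drop i).drop k = a.drop (i + k) := by
        rw [List.drop_drop, Nat.add_comm]
      rw [altStep, if_pos hguard, hcast, PySem.List.pyGetD_natCast]
      rw [Dval, dif_pos hkn]
      by_cases hc : cache.getD (i + k) 0 = -1
      case neg =>
        rw [if_pos (by simpa using hc)]
        have hc3 : (cache[i + k]?.getD 0 = -1) = False := by
          simp only [← List.getD_eq_getElem?_getD]; simpa using hc
        simp [PySem.List.pySetD_natCast, hc3]
      case pos =>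
        have hc2 : cache[i + k]?.getD 0 = -1 := by rw [← List.getD_eq_getElem?_getD]; exact hc
        rw [if_neg (by simp [List.getD_eq_getElem?_getD, hc2])]
        by_cases h3 : a.length - i - k < 3
        · rw [if_pos (show ((a.length - i : Nat) : Int) - (k : Int) < 3 by omega), if_pos h3]
          simp [PySem.List.pySetD_natCast, hc2]
        · rw [if_neg (show ¬(((a.length - i : Nat) : Int) - (k : Int) < 3) by omega), if_neg h3]
          by_cases h5 : a.length - i - k ≤ 5
          · rw [if_pos (show ((a.length - i : Nat) : Int) - (k : Int) ≤ 5 by omega), dif_pos h5]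
            rw [PySem.List.slice_from_natCast, hdropdrop]
            simp [PySem.List.pySetD_natCast, hc2]
          · rw [if_neg (show ¬(((a.length - i : Nat) : Int) - (k : Int) ≤ 5) by omega), dif_neg h5]
            have hsl : ∀ m : Nat, PySem.List.slice (a.drop i) (some (k:Int)) (some ((k:Int) + (m:Int)))
                = (a.drop (i + k)).take m := by
              intro m
              rw [show (k:Int) + (m:Int) = ((k + m : Nat) : Int) by push_cast; ring,
                PySem.List.slice_natCast, hdropdrop]
              congr 1
              omega
            have hrd : ∀ m : Nat, 3 ≤ m → m ≤ 5 →
                PySem.List.pyGetD dp ((k:Int) + (m:Int)) 0 = Dval a cache i (k + m) := by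
              intro m h3m h5m
              rw [show (k:Int) + (m:Int) = ((k + m : Nat) : Int) by push_cast; ring,
                PySem.List.pyGetD_natCast]
              exact hdp (k + m) (by omega) (by omega)
            rw [show ((k:Int) + 3) = ((k:Int) + ((3:Nat):Int)) by norm_num,
              show ((k:Int) + 4) = ((k:Int) + ((4:Nat):Int)) by norm_num,
              show ((k:Int) + 5) = ((k:Int) + ((5:Nat):Int)) by norm_num,
              hsl 3, hsl 4, hsl 5,
              hrd 3 (by omega) (by omega), hrd 4 (by omega) (by omega), hrd 5 (by omega) (by omega)]
            simp [PySem.List.pySetD_natCast, hc2]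
    rw [hrange, List.foldl_cons, hstep]
    refine ih (dp.set k (Dval a cache i k)) (by omega) (by simp [hdl]) ?_
    intro q hq hqn
    rcases Nat.eq_or_lt_of_le hq with h | h
    · rw [← h]
      rw [List.getD_eq_getElem?_getD, List.getElem?_set_self (by omega)]
      simp
    · rw [List.getD_eq_getElem?_getD, List.getElem?_set_ne (by omega),
        ← List.getD_eq_getElem?_getD]
      exact hdp q (by omega) hqn

-- ===== VERDICT (by name: the statement is the Claim_ definition above) =====
theorem solve_spec : Claim_equal_solve := by
  unfold Claim_equal_solve
  intro a cache idx _hdom hpre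
  obtain ⟨hin, hdisj⟩ := hpre
  unfold Spec_solve
  by_cases hc : PySem.List.pyGetD cache idx 0 = -1
  case neg =>
    simp [solve, solveAux, solve_alt, hc]
  case pos =>
    by_cases h3 : (PySem.List.slice a (some idx) none).length < 3
    · simp [solve, solveAux, solve_alt, hc, h3]
    · by_cases h5 : (PySem.List.slice a (some idx) none).length ≤ 5
      · simp [solve, solveAux, solve_alt, hc, h3, h5]
      · rcases hdisj with h | h | h
        · exact absurd hc (by simpa using h)
        · exact absurd h h3
        · obtain ⟨hpos, -, himp⟩ := h
          have hidx : idx = ((idx.toNat : Nat) : Int) := (Int.toNat_of_nonneg hpos).symm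
          rw [hidx] at hc h3 h5 ⊢
          generalize idx.toNat = i at *
          rw [PySem.List.slice_from_natCast] at h3 h5
          have hn : (a.drop i).length = a.length - i := by simp
          rw [hn] at h3 h5
          have hlen : a.length ≤ cache.length := himp (by
            rw [hidx, PySem.List.slice_from_natCast, hn]; omega)
          have hA := solveAux_eq a cache i hlen (a.length + 1) 0 cache
            ⟨rfl, fun j _ => Or.inl rfl⟩ (by omega) (by omega)
          rw [show (i : Int) + ((0 : Nat) : Int) = ((i : Nat) : Int) by push_cast; ring] at hA
          have hB := fold_dp a cache i hlen (a.length - i)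
            (List.replicate (a.length - i + 1) 0) (le_refl _) (by simp)
            (fun q hq hq' => absurd hq' (by omega))
          rw [solve, solve_alt]
          dsimp only
          rw [if_neg (by simpa using hc), PySem.List.slice_from_natCast, hn,
            if_neg h3, if_neg h5, hA.1]
          rw [PySem.List.pyGetD_zero]
          exact (hB.2 0 (by omega)).symm
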